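-- pv_equiv track=rewrite | github.com/pypi-data/pypi-mirror-153 | packages/FODGE/FODGE-0.0.11.tar.gz/FODGE-0.0.11/src/FODGE/evaluation_tasks/tlp_utils.py | nodes_test_in_train
-- ===== SOURCE A (Python) =====
-- def nodes_test_in_train(nodes_list, index):
--     """
--     Given list of nodes for each time stamp and an index separating between train and test examples, return the nodes
--     in the test set that are also in the training set.
--     :param nodes_list: List of lists of nodes for each time stamp.
--     :param index: Index indicating the time stamp that afterwards it's the test set, and beforehand it's the train set.
--     :return: A list of nodes in the test set that are also in the train set
--     """
--     nodes_train = []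
--     nodes_test = []
--
--     for i in range(len(nodes_list)):
--         if i < index:
--             for j in nodes_list[i]:
--                 nodes_train.append(j)
--         else:
--             for j in nodes_list[i]:
--                 nodes_test.append(j)
--
--     nodes_train = set(dict.fromkeys(nodes_train))
--     nodes_test = set(dict.fromkeys(nodes_test))
--     nodes = nodes_train.intersection(nodes_test)
--
--     return nodes
-- ===== SOURCE B (Python) =====
-- def nodes_test_in_train(nodes_list, index):
--     """Same result as A, by a per-node occurrence-interval computation instead of
--     partition + intersection: one pass records each node's first and last time
--     stamp; a node is in the answer iff its first stamp is before `index` (so it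
--     occurs in the train part) and its last stamp is at or after `index` (so it
--     occurs in the test part)."""
--     occ = {}
--     for i, sub in enumerate(nodes_list):
--         for n in sub:
--             if n in occ:
--                 occ[n] = (occ[n][0], i)
--             else:
--                 occ[n] = (i, i)
--     return {n for n, (first, last) in occ.items() if first < index <= last}
-- ===== Notes on version B (the rewrite author's own statement) =====
-- stated objective: alternative
-- what changed: A partitions the flattened nodes into train and test lists, dedups both and intersects the two sets; B never partitions: one pass builds a per-node (first, last) time-stamp interval dict, and the answer is the nodes whose interval straddles the index (first < index <= last).
import Mathlib
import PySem

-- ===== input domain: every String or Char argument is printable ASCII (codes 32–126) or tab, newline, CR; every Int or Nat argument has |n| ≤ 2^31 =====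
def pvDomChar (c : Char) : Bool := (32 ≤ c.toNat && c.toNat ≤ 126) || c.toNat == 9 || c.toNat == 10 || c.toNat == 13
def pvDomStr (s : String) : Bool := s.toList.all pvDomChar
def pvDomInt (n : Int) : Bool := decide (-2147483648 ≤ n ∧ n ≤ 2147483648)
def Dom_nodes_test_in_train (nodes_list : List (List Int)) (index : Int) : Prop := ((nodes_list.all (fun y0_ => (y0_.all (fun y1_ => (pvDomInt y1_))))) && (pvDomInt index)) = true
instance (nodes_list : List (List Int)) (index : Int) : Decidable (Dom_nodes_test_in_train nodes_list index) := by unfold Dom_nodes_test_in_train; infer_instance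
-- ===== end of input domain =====

-- B replaces A's partition/dedup/intersect pipeline with a per-node (first, last) time-stamp
-- interval dict built in one pass; a node is kept iff first < index <= last (objective: alternative).
-- Both Pythons return a set; the result is a PySem.Set, compared as a finite set.

-- ===== PORT A =====
-- literal port of A: index loop appending into two lists, then set(dict.fromkeys(..))
-- on both and .intersection
def nodes_test_in_train (nodes_list : List (List Int)) (index : Int) : List Int :=
  let tt := (PySem.List.pyRange 0 (PySem.List.len nodes_list)).foldl
    (fun (q : List Int × List Int) i =>
      if i < index then
        ((PySem.List.pyGetD nodes_list i []).foldl (fun a j => a ++ [j]) q.1, q.2)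
      else
        (q.1, (PySem.List.pyGetD nodes_list i []).foldl (fun a j => a ++ [j]) q.2))
    ([], [])
  let nodes_train : PySem.Set Int := PySem.Set.ofList (PySem.List.dedup tt.1)
  let nodes_test : PySem.Set Int := PySem.Set.ofList (PySem.List.dedup tt.2)
  PySem.Set.inter nodes_train nodes_test

-- ===== PORT B =====
-- literal port of Source B: one pass over enumerate(nodes_list) recording each node's
-- (first, last) time stamp in a dict (occ[n][0] is read under 'n in occ', so the
-- getD default (0, 0) is never the value used), then the filtering set comprehension
def nodes_test_in_train_alt (nodes_list : List (List Int)) (index : Int) : List Int :=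
  let occ : PySem.Dict Int (Int × Int) :=
    (PySem.List.enumerate nodes_list).foldl
      (fun d p => p.2.foldl
        (fun d n => if d.contains n then d.insert n ((d.getD n (0, 0)).1, p.1)
                    else d.insert n (p.1, p.1)) d)
      PySem.Dict.empty
  occ.items.foldl
    (fun s q => if q.2.1 < index ∧ index ≤ q.2.2 then PySem.Set.add s q.1 else s)
    PySem.Set.empty


-- ===== PRECONDITION & SPEC =====
def Spec_nodes_test_in_train (nodes_list : List (List Int)) (index : Int) (out : List Int) : Prop := out = nodes_test_in_train_alt nodes_list index
instance (nodes_list : List (List Int)) (index : Int) (out : List Int) : Decidable (Spec_nodes_test_in_train nodes_list index out) := by unfold Spec_nodes_test_in_train; infer_instance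

-- ===== CLAIM (what is proved, stated in full; the proofs are below) =====
def Claim_equal_nodes_test_in_train : Prop := ∀ (nodes_list : List (List Int)) (index : Int), Dom_nodes_test_in_train nodes_list index → Spec_nodes_test_in_train nodes_list index (nodes_test_in_train nodes_list index)

-- ===== LEMMAS AND PROOFS =====

-- one step of B's dict loop, on one (time stamp, node) pair, and the flattened
-- stream of (time stamp, node) pairs B traverses
def stepB (d : PySem.Dict Int (Int × Int)) (q : Int × Int) : PySem.Dict Int (Int × Int) :=
  if d.contains q.2 then d.insert q.2 ((d.getD q.2 (0, 0)).1, q.1)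
  else d.insert q.2 (q.1, q.1)

theorem stepB_eq_insert (d : PySem.Dict Int (Int × Int)) (q : Int × Int) :
    stepB d q = d.insert q.2
      (if d.contains q.2 then ((d.getD q.2 (0, 0)).1, q.1) else (q.1, q.1)) := by
  unfold stepB; split <;> rfl

theorem stepB_funext : stepB = fun d (q : Int × Int) => d.insert q.2
      (if d.contains q.2 then ((d.getD q.2 (0, 0)).1, q.1) else (q.1, q.1)) :=
  funext fun d => funext fun q => stepB_eq_insert d q

theorem keys_buildB (P : List (Int × Int)) :
    (P.foldl stepB PySem.Dict.empty).keys = PySem.Set.ofList (P.map (·.2)) := by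
  rw [stepB_funext, PySem.Dict.keys_foldl_insert_key P (·.2)
    (fun d q => if d.contains q.2 then ((d.getD q.2 (0, 0)).1, q.1) else (q.1, q.1))]
  rw [PySem.Set.ofList_eq_foldl]
  rfl

theorem nodup_keys_buildB (P : List (Int × Int)) :
    (P.foldl stepB PySem.Dict.empty).keys.Nodup := by
  rw [stepB_funext]
  exact PySem.Dict.nodup_keys_foldl_insert_key P (·.2) _ _ (by simp [PySem.Dict.keys_empty])

theorem contains_buildB (P : List (Int × Int)) (n : Int) :
    (P.foldl stepB PySem.Dict.empty).contains n = true ↔ n ∈ P.map (·.2) := by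
  rw [PySem.Dict.contains_iff_mem_keys, keys_buildB, PySem.Set.mem_ofList]

def fstOcc (n : Int) (P : List (Int × Int)) : Int :=
  ((P.find? (fun q => q.2 == n)).map (·.1)).getD 0
def lstOcc (n : Int) (P : List (Int × Int)) : Int :=
  ((P.reverse.find? (fun q => q.2 == n)).map (·.1)).getD 0

theorem find?_isSome_of_mem (P : List (Int × Int)) (n : Int) (h : n ∈ P.map (·.2)) :
    (P.find? (fun q => q.2 == n)).isSome := by
  rw [List.find?_isSome]
  obtain ⟨q, hq, hq2⟩ := List.mem_map.mp h
  exact ⟨q, hq, by simp [hq2]⟩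

theorem getD_buildB (P : List (Int × Int)) (n : Int) (h : n ∈ P.map (·.2)) :
    (P.foldl stepB PySem.Dict.empty).getD n (0, 0) = (fstOcc n P, lstOcc n P) := by
  induction P using List.reverseRecOn with
  | nil => simp at h
  | append_singleton P q ih =>
    obtain ⟨i, m⟩ := q
    rw [List.foldl_append, List.foldl_cons, List.foldl_nil]
    by_cases hnm : n = m
    · subst hnm
      by_cases hmem : n ∈ P.map (·.2)
      · have hc : (P.foldl stepB PySem.Dict.empty).contains n = true :=
          (contains_buildB P n).mpr hmem
        have hf : fstOcc n (P ++ [(i, n)]) = fstOcc n P := by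
          unfold fstOcc
          rw [List.find?_append]
          obtain ⟨v, hv⟩ := Option.isSome_iff_exists.mp (find?_isSome_of_mem P n hmem)
          rw [hv]; rfl
        have hl : lstOcc n (P ++ [(i, n)]) = i := by
          unfold lstOcc
          rw [List.reverse_append]
          simp [List.find?_cons_of_pos]
        rw [stepB_eq_insert, PySem.Dict.getD_insert_self, hc, ih hmem, hf, hl]
        simp
      · have hc : (P.foldl stepB PySem.Dict.empty).contains n = false := by
          rw [← Bool.not_eq_true]; simp [contains_buildB, hmem]
        have hnone : P.find? (fun q => q.2 == n) = none := by
          rw [List.find?_eq_none]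
          intro x hx
          simp only [beq_iff_eq]
          exact fun hxe => hmem (List.mem_map.mpr ⟨x, hx, hxe⟩)
        have hf : fstOcc n (P ++ [(i, n)]) = i := by
          unfold fstOcc
          rw [List.find?_append, hnone]
          simp
        have hl : lstOcc n (P ++ [(i, n)]) = i := by
          unfold lstOcc
          rw [List.reverse_append]
          simp [List.find?_cons_of_pos]
        rw [stepB_eq_insert, PySem.Dict.getD_insert_self, hc, hf, hl]
        simp
    · have hmem : n ∈ P.map (·.2) := by
        rcases List.mem_map.mp h with ⟨x, hx, hxe⟩
        rcases List.mem_append.mp hx with hx' | hx'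
        · exact List.mem_map.mpr ⟨x, hx', hxe⟩
        · simp at hx'; subst hx'; simp at hxe; exact absurd hxe (Ne.symm hnm)
      have hf : fstOcc n (P ++ [(i, m)]) = fstOcc n P := by
        unfold fstOcc
        rw [List.find?_append]
        obtain ⟨v, hv⟩ := Option.isSome_iff_exists.mp (find?_isSome_of_mem P n hmem)
        rw [hv]; rfl
      have hl : lstOcc n (P ++ [(i, m)]) = lstOcc n P := by
        unfold lstOcc
        rw [List.reverse_append]
        simp only [List.reverse_cons, List.reverse_nil, List.nil_append, List.singleton_append]
        rw [List.find?_cons_of_neg]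
        simp [Ne.symm hnm]
      rw [stepB_eq_insert, PySem.Dict.getD_insert_of_ne _ _ _ hnm, ih hmem, hf, hl]

theorem find?_fst_le (p : Int × Int → Bool) :
    ∀ (P : List (Int × Int)), P.Pairwise (fun a b => a.1 ≤ b.1) →
    ∀ a, P.find? p = some a → ∀ b ∈ P, p b = true → a.1 ≤ b.1 := by
  intro P
  induction P with
  | nil => intro _ a ha; simp at ha
  | cons x t ih =>
    intro hs a ha b hb hpb
    by_cases hpx : p x = true
    · rw [List.find?_cons_of_pos hpx] at ha
      cases ha
      rcases hb with _ | hb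
      · exact le_refl _
      · exact (List.pairwise_cons.mp hs).1 b (by assumption)
    · rw [List.find?_cons_of_neg hpx] at ha
      rcases hb with _ | hb
      · exact absurd hpb hpx
      · exact ih (List.pairwise_cons.mp hs).2 a ha b (by assumption) hpb

theorem find?_fst_ge (p : Int × Int → Bool) :
    ∀ (P : List (Int × Int)), P.Pairwise (fun a b => b.1 ≤ a.1) →
    ∀ a, P.find? p = some a → ∀ b ∈ P, p b = true → b.1 ≤ a.1 := by
  intro P
  induction P with
  | nil => intro _ a ha; simp at ha
  | cons x t ih =>
    intro hs a ha b hb hpb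
    by_cases hpx : p x = true
    · rw [List.find?_cons_of_pos hpx] at ha
      cases ha
      rcases hb with _ | hb
      · exact le_refl _
      · exact (List.pairwise_cons.mp hs).1 b (by assumption)
    · rw [List.find?_cons_of_neg hpx] at ha
      rcases hb with _ | hb
      · exact absurd hpb hpx
      · exact ih (List.pairwise_cons.mp hs).2 a ha b (by assumption) hpb

theorem fstOcc_lt_iff (P : List (Int × Int)) (hs : P.Pairwise (fun a b => a.1 ≤ b.1))
    (n : Int) (h : n ∈ P.map (·.2)) (index : Int) :
    fstOcc n P < index ↔ n ∈ (P.filter (fun q => decide (q.1 < index))).map (·.2) := by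
  obtain ⟨q0, hq0⟩ := Option.isSome_iff_exists.mp (find?_isSome_of_mem P n h)
  have hq0P : q0 ∈ P := List.mem_of_find?_eq_some hq0
  have hq0n : q0.2 = n := by
    have := List.find?_some hq0; simpa using this
  have hfo : fstOcc n P = q0.1 := by unfold fstOcc; rw [hq0]; rfl
  rw [hfo]
  constructor
  · intro hlt
    exact List.mem_map.mpr ⟨q0, List.mem_filter.mpr ⟨hq0P, by simpa using hlt⟩, hq0n⟩
  · rintro hmem
    obtain ⟨q, hq, hqn⟩ := List.mem_map.mp hmem
    have hqP := List.mem_of_mem_filter hq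
    have hqlt : q.1 < index := by simpa using List.of_mem_filter hq
    have : q0.1 ≤ q.1 :=
      find?_fst_le _ P hs q0 hq0 q hqP (by simp [hqn])
    omega

theorem le_lstOcc_iff (P : List (Int × Int)) (hs : P.Pairwise (fun a b => a.1 ≤ b.1))
    (n : Int) (h : n ∈ P.map (·.2)) (index : Int) :
    index ≤ lstOcc n P ↔ n ∈ (P.filter (fun q => !decide (q.1 < index))).map (·.2) := by
  have hR : n ∈ P.reverse.map (·.2) := by simpa using h
  have hsR : P.reverse.Pairwise (fun a b => b.1 ≤ a.1) := List.pairwise_reverse.mpr hs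
  obtain ⟨q0, hq0⟩ := Option.isSome_iff_exists.mp (find?_isSome_of_mem P.reverse n hR)
  have hq0P : q0 ∈ P := by simpa using List.mem_of_find?_eq_some hq0
  have hq0n : q0.2 = n := by
    have := List.find?_some hq0; simpa using this
  have hfo : lstOcc n P = q0.1 := by unfold lstOcc; rw [hq0]; rfl
  rw [hfo]
  constructor
  · intro hle
    exact List.mem_map.mpr ⟨q0, List.mem_filter.mpr ⟨hq0P, by simp; omega⟩, hq0n⟩
  · rintro hmem
    obtain ⟨q, hq, hqn⟩ := List.mem_map.mp hmem
    have hqP := List.mem_of_mem_filter hq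
    have hqge : index ≤ q.1 := by
      have := List.of_mem_filter hq; simp at this; omega
    have : q.1 ≤ q0.1 :=
      find?_fst_ge _ P.reverse hsR q0 hq0 q (by simpa using hqP) (by simp [hqn])
    omega

def flatPairs (nodes_list : List (List Int)) : List (Int × Int) :=
  (PySem.List.enumerate nodes_list).flatMap (fun p => p.2.map (fun n => (p.1, n)))

theorem pairwise_flatMap_pairs (l : List (Int × List Int))
    (hs : l.Pairwise (fun a b => a.1 < b.1)) :
    (l.flatMap (fun p => p.2.map (fun n => (p.1, n)))).Pairwise
      (fun (a b : Int × Int) => a.1 ≤ b.1) := by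
  induction l with
  | nil => simp
  | cons x t ih =>
    rw [List.flatMap_cons, List.pairwise_append]
    refine ⟨?_, ih (List.pairwise_cons.mp hs).2, ?_⟩
    · apply List.Pairwise.map
      · intro a b (hab : x.1 ≤ x.1); exact hab
      · exact List.pairwise_iff_forall_sublist.mpr (fun _ => le_refl _)
    · intro a ha b hb
      obtain ⟨na, _, hna⟩ := List.mem_map.mp ha
      obtain ⟨p, hp, hbp⟩ := List.mem_flatMap.mp hb
      obtain ⟨nb, _, hnb⟩ := List.mem_map.mp hbp
      have hx := (List.pairwise_cons.mp hs).1 p hp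
      subst hna; subst hnb
      exact le_of_lt hx

theorem pairwise_flatPairs (nodes_list : List (List Int)) :
    (flatPairs nodes_list).Pairwise (fun a b => a.1 ≤ b.1) :=
  pairwise_flatMap_pairs _ (PySem.List.pairwise_lt_enumerate nodes_list 0)

theorem filter_append_filter_not (P : List (Int × Int))
    (hs : P.Pairwise (fun a b => a.1 ≤ b.1)) (index : Int) :
    P.filter (fun q => decide (q.1 < index)) ++ P.filter (fun q => !decide (q.1 < index)) = P := by
  induction P with
  | nil => rfl
  | cons x t ih =>
    obtain ⟨hhead, htail⟩ := List.pairwise_cons.mp hs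
    by_cases hx : x.1 < index
    · have := ih htail
      simp only [List.filter_cons, hx, decide_true, Bool.not_true, if_true,
        Bool.false_eq_true, if_false, List.cons_append, this]
    · have h1 : t.filter (fun q => decide (q.1 < index)) = [] := by
        rw [List.filter_eq_nil_iff]
        intro q hq
        have := hhead q hq
        simp; omega
      have h2 : t.filter (fun q => !decide (q.1 < index)) = t := by
        rw [List.filter_eq_self]
        intro q hq
        have := hhead q hq
        simp; omega
      simp only [List.filter_cons, hx, decide_false, Bool.not_false, h1, h2,
        Bool.false_eq_true, if_false, if_true, List.nil_append]

theorem filter_update_of (s : PySem.Set Int) (v : List Int) (p : Int → Bool)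
    (h : ∀ x ∈ v, p x = false ∨ x ∈ s) :
    (PySem.Set.update s v).filter p = s.filter p := by
  induction v generalizing s with
  | nil => rfl
  | cons x v ih =>
    rw [show PySem.Set.update s (x :: v) = PySem.Set.update (PySem.Set.add s x) v from rfl]
    by_cases hx : x ∈ s
    · rw [PySem.Set.add_of_mem hx]
      exact ih s (fun y hy => h y (List.mem_cons_of_mem x hy))
    · have hpx : p x = false := by
        rcases h x (List.mem_cons_self) with hp | hmem
        · exact hp
        · exact absurd hmem hx
      rw [PySem.Set.add_of_not_mem hx]
      have := ih (s ++ [x]) (fun y hy => by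
        rcases h y (List.mem_cons_of_mem x hy) with hp | hmem
        · exact Or.inl hp
        · exact Or.inr (List.mem_append_left _ hmem))
      rw [this, List.filter_append]
      simp [hpx]

theorem lemA (index : Int) (l : List (Int × List Int)) (a b : List Int) :
    l.foldl (fun (q : List Int × List Int) p =>
        if p.1 < index then (p.2.foldl (fun a j => a ++ [j]) q.1, q.2)
        else (q.1, p.2.foldl (fun a j => a ++ [j]) q.2)) (a, b)
      = (a ++ (l.filter (fun p => decide (p.1 < index))).flatMap (·.2),
         b ++ (l.filter (fun p => !decide (p.1 < index))).flatMap (·.2)) := by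
  simp only [PySem.List.foldl_append_singleton_eq_self]
  induction l generalizing a b with
  | nil => simp
  | cons p l ih =>
    by_cases h : p.1 < index <;>
      simp [h, List.foldl_cons, ih]

theorem filter_flatMap_pairs (l : List (Int × List Int)) (pr : Int → Bool) :
    ((l.flatMap (fun p => p.2.map (fun n => (p.1, n)))).filter (fun q => pr q.1)).map (·.2)
      = (l.filter (fun p => pr p.1)).flatMap (·.2) := by
  induction l with
  | nil => rfl
  | cons x t ih =>
    rw [List.flatMap_cons, List.filter_append, List.map_append, ih, List.filter_cons]
    by_cases h : pr x.1
    · simp [h, List.filter_map, Function.comp_def]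
    · simp [h, List.filter_map, Function.comp_def]

-- the two ports agree on every input
theorem ports_eq (nodes_list : List (List Int)) (index : Int) :
    nodes_test_in_train nodes_list index = nodes_test_in_train_alt nodes_list index := by
  -- abbreviations
  set E := PySem.List.enumerate nodes_list with hE
  set P := flatPairs nodes_list with hP
  have hsort := pairwise_flatPairs nodes_list
  set trainM := (P.filter (fun q => decide (q.1 < index))).map (·.2) with htrainM
  set testM := (P.filter (fun q => !decide (q.1 < index))).map (·.2) with htestM
  -- ===== A side =====
  have hfold : (PySem.List.pyRange 0 (PySem.List.len nodes_list)).foldl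
      (fun (q : List Int × List Int) i =>
        if i < index then
          ((PySem.List.pyGetD nodes_list i []).foldl (fun a j => a ++ [j]) q.1, q.2)
        else
          (q.1, (PySem.List.pyGetD nodes_list i []).foldl (fun a j => a ++ [j]) q.2))
      ([], [])
      = E.foldl
        (fun (q : List Int × List Int) p =>
          if p.1 < index then (p.2.foldl (fun a j => a ++ [j]) q.1, q.2)
          else (q.1, p.2.foldl (fun a j => a ++ [j]) q.2)) ([], []) := by
    rw [hE, PySem.List.enumerate_eq_map_pyRange nodes_list ([] : List Int), List.foldl_map]
  have htrain2 : trainM = (E.filter (fun p => decide (p.1 < index))).flatMap (·.2) := by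
    rw [htrainM, hP]; exact filter_flatMap_pairs E (fun i => decide (i < index))
  have htest2 : testM = (E.filter (fun p => !decide (p.1 < index))).flatMap (·.2) := by
    rw [htestM, hP]; exact filter_flatMap_pairs E (fun i => !decide (i < index))
  have hA : nodes_test_in_train nodes_list index
      = (PySem.Set.ofList trainM).filter
          (fun x => PySem.Set.contains (PySem.Set.ofList testM) x) := by
    show PySem.Set.inter _ _ = _
    rw [hfold, lemA]
    simp only [List.nil_append]
    rw [PySem.List.dedup_eq_ofList, PySem.List.dedup_eq_ofList,
      PySem.Set.ofList_ofList, PySem.Set.ofList_ofList, htrain2, htest2]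
    rfl
  -- ===== B side =====
  set D := P.foldl stepB PySem.Dict.empty with hD
  have hBfold : nodes_test_in_train_alt nodes_list index
      = D.items.foldl
          (fun s q => if q.2.1 < index ∧ index ≤ q.2.2 then PySem.Set.add s q.1 else s)
          PySem.Set.empty := by
    show (E.foldl _ PySem.Dict.empty).items.foldl _ _ = _
    rw [hD, hP, flatPairs, List.foldl_flatMap]
    simp only [List.foldl_map]
    rfl
  set K := D.keys with hK
  have hKval : K = PySem.Set.ofList (P.map (·.2)) := keys_buildB P
  have hKnd : K.Nodup := nodup_keys_buildB P
  have hitems : D.items = K.map (fun k => (k, D.getD k (0, 0))) :=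
    PySem.Dict.items_eq_map_keys D hKnd (0, 0)
  have hB : nodes_test_in_train_alt nodes_list index
      = PySem.Set.ofList (K.filter
          (fun k => decide ((D.getD k (0, 0)).1 < index ∧ index ≤ (D.getD k (0, 0)).2))) := by
    rw [hBfold, PySem.List.foldl_ite_eq_foldl_filter
      (p := fun (q : Int × Int × Int) => q.2.1 < index ∧ index ≤ q.2.2)]
    rw [hitems, List.filter_map, ← List.foldl_map (f := fun (q : Int × Int × Int) => q.1), List.map_map]
    rw [PySem.Set.ofList_eq_foldl]
    simp [Function.comp_def]
  -- rewrite the key filter through the occurrence characterisation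
  have hcong : K.filter
        (fun k => decide ((D.getD k (0, 0)).1 < index ∧ index ≤ (D.getD k (0, 0)).2))
      = K.filter (fun k => decide (k ∈ trainM) && decide (k ∈ testM)) := by
    apply List.filter_congr
    intro k hk
    have hkmem : k ∈ P.map (·.2) := by
      rw [hKval] at hk; exact (PySem.Set.mem_ofList _ _).mp hk
    rw [hD, getD_buildB P k hkmem]
    have h1 := fstOcc_lt_iff P hsort k hkmem index
    have h2 := le_lstOcc_iff P hsort k hkmem index
    rw [← htrainM] at h1; rw [← htestM] at h2
    by_cases ha : k ∈ trainM <;> by_cases hb : k ∈ testM <;>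
      simp [ha, hb, h1, h2]
  -- K as update of the train set by the test stream
  have hKsplit : K = PySem.Set.update (PySem.Set.ofList trainM) testM := by
    rw [hKval]
    have : P.map (·.2) = trainM ++ testM := by
      rw [htrainM, htestM, ← List.map_append, filter_append_filter_not P hsort]
    rw [this, PySem.Set.ofList_eq_foldl, List.foldl_append]
    rw [show PySem.Set.update (PySem.Set.ofList trainM) testM
        = testM.foldl PySem.Set.add (PySem.Set.ofList trainM) from rfl,
      PySem.Set.ofList_eq_foldl]
  have hdrop : (PySem.Set.update (PySem.Set.ofList trainM) testM).filter
        (fun k => decide (k ∈ trainM) && decide (k ∈ testM))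
      = (PySem.Set.ofList trainM).filter (fun k => decide (k ∈ trainM) && decide (k ∈ testM)) := by
    apply filter_update_of
    intro x hx
    by_cases hxt : x ∈ trainM
    · exact Or.inr ((PySem.Set.mem_ofList _ _).mpr hxt)
    · left; simp [hxt]
  have hfinal : (PySem.Set.ofList trainM).filter
        (fun k => decide (k ∈ trainM) && decide (k ∈ testM))
      = (PySem.Set.ofList trainM).filter
          (fun x => PySem.Set.contains (PySem.Set.ofList testM) x) := by
    apply List.filter_congr
    intro k hk
    have hkt : k ∈ trainM := (PySem.Set.mem_ofList _ _).mp hk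
    by_cases hb : k ∈ testM <;>
      simp [hkt, hb, PySem.Set.contains, PySem.Set.mem_ofList]
  rw [hA, hB, hcong, hKsplit, hdrop, hfinal,
    PySem.Set.ofList_eq_self_of_nodup _ (List.Nodup.filter _ (PySem.Set.nodup_ofList _))]

-- ===== VERDICT (by name: the statement is the Claim_ definition above) =====
theorem nodes_test_in_train_spec : Claim_equal_nodes_test_in_train := by
  intro nodes_list index _
  unfold Spec_nodes_test_in_train
  exact ports_eq nodes_list index
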